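-- pv_equiv track=rewrite | github.com/PolySim/studio-polytech-lille | backend/app.py | wordWithoutStyle
-- ===== SOURCE A (Python) =====
-- def wordWithoutStyle(text):
--     count = 0
--     word = ""
--     for letter in text:
--         if letter == '[':
--             count += 1
--         elif letter == ']':
--             count -= 1
--         else:
--             if count == 0:
--                 word += letter
--     return word
-- ===== SOURCE B (Python) =====
-- def wordWithoutStyle(text):
--     # pass 1: delta table (+1 for '[', -1 for ']', 0 otherwise)
--     deltas = [(c == '[') - (c == ']') for c in text]
--     # pass 2: inclusive running depths (cumulative sum of deltas)
--     depths = []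
--     total = 0
--     for d in deltas:
--         total += d
--         depths.append(total)
--     # pass 3: keep chars that are not brackets (delta 0) at depth 0
--     return "".join(c for c, d, h in zip(text, deltas, depths) if d == 0 and h == 0)
-- ===== Notes on version B (the rewrite author's own statement) =====
-- stated objective: alternative
-- what changed: Replaces the single stateful filter-as-you-go loop by three materialized passes: a delta table, an inclusive running-depth table, and a zip/filter join of characters whose delta and depth are both zero.
import Mathlib
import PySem

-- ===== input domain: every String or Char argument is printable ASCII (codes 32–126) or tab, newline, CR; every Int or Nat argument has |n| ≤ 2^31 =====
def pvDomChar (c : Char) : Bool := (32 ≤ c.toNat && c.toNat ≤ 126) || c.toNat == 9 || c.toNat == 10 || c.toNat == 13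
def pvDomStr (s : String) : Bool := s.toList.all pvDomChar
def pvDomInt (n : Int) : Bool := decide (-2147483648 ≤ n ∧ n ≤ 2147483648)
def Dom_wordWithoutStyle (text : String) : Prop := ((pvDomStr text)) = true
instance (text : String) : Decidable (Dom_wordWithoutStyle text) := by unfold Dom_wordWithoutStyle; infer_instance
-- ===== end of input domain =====

-- B replaces A's stateful filtering loop by materialized delta/depth tables and a zip-filter join (alternative decomposition, same result).

-- ===== PORT A =====
-- A's loop body (count, word) -> next state, as a named step function; word kept as List Char, joined at the end
def pvStepA (st : Int × List Char) (letter : Char) : Int × List Char :=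
  if letter = '[' then (st.1 + 1, st.2)
  else if letter = ']' then (st.1 - 1, st.2)
  else if st.1 = 0 then (st.1, st.2 ++ [letter]) else st

def wordWithoutStyle (text : String) : String :=
  String.ofList ((text.toList.foldl pvStepA (0, [])).2)

-- ===== PORT B =====
-- (c == '[') - (c == ']')
def pvDelta (c : Char) : Int :=
  (if c = '[' then (1 : Int) else 0) - (if c = ']' then (1 : Int) else 0)

-- the running-sum loop of Source B (total starts at t)
def pvCumsum (t : Int) : List Int → List Int
  | [] => []
  | d :: ds => (t + d) :: pvCumsum (t + d) ds

def wordWithoutStyle_alt (text : String) : String :=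
  let cs := text.toList
  let deltas := cs.map pvDelta
  let depths := pvCumsum 0 deltas
  String.ofList (((cs.zip (deltas.zip depths)).filter
      (fun p => p.2.1 == 0 && p.2.2 == 0)).map (fun p => p.1))

-- ===== PRECONDITION & SPEC =====
def Spec_wordWithoutStyle (text : String) (out : String) : Prop := out = wordWithoutStyle_alt text
instance (text : String) (out : String) : Decidable (Spec_wordWithoutStyle text out) := by unfold Spec_wordWithoutStyle; infer_instance

-- ===== CLAIM (what is proved, stated in full; the proofs are below) =====
def Claim_equal_wordWithoutStyle : Prop := ∀ (text : String), Dom_wordWithoutStyle text → Spec_wordWithoutStyle text (wordWithoutStyle text)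

-- ===== LEMMAS AND PROOFS =====
lemma pv_loop_eq (cs : List Char) : ∀ (t : Int) (acc : List Char),
    (cs.foldl pvStepA (t, acc)).2 =
      acc ++ ((cs.zip ((cs.map pvDelta).zip (pvCumsum t (cs.map pvDelta)))).filter
        (fun p => p.2.1 == 0 && p.2.2 == 0)).map (fun p => p.1) := by
  induction cs with
  | nil => intro t acc; simp [pvCumsum]
  | cons c rest ih =>
    intro t acc
    by_cases h1 : c = '['
    · simp [pvStepA, pvDelta, pvCumsum, h1, ih]
    · by_cases h2 : c = ']'
      · simp [pvStepA, pvDelta, pvCumsum, h2, ih, sub_eq_add_neg]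
      · by_cases h3 : t = 0
        · simp [pvStepA, pvDelta, pvCumsum, h1, h2, h3, ih]
        · simp [pvStepA, pvDelta, pvCumsum, h1, h2, h3, ih]

-- ===== VERDICT (by name: the statement is the Claim_ definition above) =====
theorem wordWithoutStyle_spec : Claim_equal_wordWithoutStyle := by
  intro text _
  unfold Spec_wordWithoutStyle wordWithoutStyle wordWithoutStyle_alt
  simp [pv_loop_eq]
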